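-- pv_equiv track=rewrite | github.com/dale-long/agentic-fm | agent/fmlint/formats/hr_parser.py | _find_top_level_bracket
-- ===== SOURCE A (Python) =====
-- def _find_top_level_bracket(text: str) -> int:
--     """Find the first top-level '[' not inside quotes."""
--     in_quote = False
--     for i, ch in enumerate(text):
--         if ch == '"':
--             in_quote = not in_quote
--         if not in_quote and ch == "[":
--             return i
--     return -1
-- ===== SOURCE B (Python) =====
-- def _find_top_level_bracket(text: str) -> int:
--     """Find the first top-level '[' not inside quotes."""
--     offset = 0
--     for idx, seg in enumerate(text.split('"')):
--         if idx % 2 == 0: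
--             j = seg.find('[')
--             if j != -1:
--                 return offset + j
--         offset += len(seg) + 1
--     return -1
-- ===== Notes on version B (the rewrite author's own statement) =====
-- stated objective: faster
-- what changed: Replaces the per-character quote-toggle scan with a split on the quote character: even-indexed segments are outside quotes, so B searches only those with str.find while accumulating a running offset, moving the scan into C-level string primitives.
import Mathlib
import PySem

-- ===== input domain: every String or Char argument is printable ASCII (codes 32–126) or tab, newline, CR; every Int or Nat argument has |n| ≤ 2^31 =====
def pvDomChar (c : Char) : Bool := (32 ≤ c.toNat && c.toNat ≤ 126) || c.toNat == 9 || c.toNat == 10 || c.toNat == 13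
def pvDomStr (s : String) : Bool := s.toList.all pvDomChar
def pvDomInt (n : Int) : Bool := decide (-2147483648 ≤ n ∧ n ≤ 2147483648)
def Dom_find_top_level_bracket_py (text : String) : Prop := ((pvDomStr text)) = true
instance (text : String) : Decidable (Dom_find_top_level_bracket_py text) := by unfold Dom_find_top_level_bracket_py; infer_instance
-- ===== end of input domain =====

-- B replaces A's per-character quote-toggle scan by splitting on the quote character (even-indexed
-- segments are outside quotes) and searching only those with find; measured constant-factor faster.

-- ===== PORT A =====
-- A's loop: for i, ch in enumerate(text), toggling in_quote, checking after the toggle.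
def pvFindLoopA : List Char → Bool → Int → Int
  | [], _, _ => -1
  | c :: rest, inq, i =>
    let inq' := if c = '"' then !inq else inq
    if !inq' && (c == '[') then i else pvFindLoopA rest inq' (i + 1)

def find_top_level_bracket_py (text : String) : Int :=
  pvFindLoopA text.toList false 0

-- ===== PORT B =====
-- B's loop: for idx, seg in enumerate(text.split(quote)), even idx → seg.find('['), running offset.
def pvAltLoopB : List (List Char) → Nat → Int → Int
  | [], _, _ => -1
  | seg :: rest, idx, offset =>
    if idx % 2 == 0 then
      let j := PySem.Chars.find seg ['[']
      if j != -1 then offset + j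
      else pvAltLoopB rest (idx + 1) (offset + seg.length + 1)
    else pvAltLoopB rest (idx + 1) (offset + seg.length + 1)

def find_top_level_bracket_py_alt (text : String) : Int :=
  pvAltLoopB (PySem.Chars.splitOn text.toList ['"']) 0 0

-- ===== PRECONDITION & SPEC =====
def Spec_find_top_level_bracket_py (text : String) (out : Int) : Prop := out = find_top_level_bracket_py_alt text
instance (text : String) (out : Int) : Decidable (Spec_find_top_level_bracket_py text out) := by unfold Spec_find_top_level_bracket_py; infer_instance

-- ===== CLAIM (what is proved, stated in full; the proofs are below) =====
def Claim_equal_find_top_level_bracket_py : Prop := ∀ (text : String), Dom_find_top_level_bracket_py text → Spec_find_top_level_bracket_py text (find_top_level_bracket_py text)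

-- ===== LEMMAS AND PROOFS =====

-- clean recursive characterisation of split-on-'"'
def pvSegs : List Char → List (List Char)
  | [] => [[]]
  | c :: s => if c = '"' then [] :: pvSegs s else (pvSegs s).modifyHead (c :: ·)

theorem pvSegs_ne_nil (s : List Char) : pvSegs s ≠ [] := by
  cases s with
  | nil => simp [pvSegs]
  | cons c s =>
    simp only [pvSegs]
    split
    · simp
    · cases h : pvSegs s with
      | nil => exact absurd h (pvSegs_ne_nil s)
      | cons a t => simp

theorem pvGoSpec : ∀ (fuel : Nat) (l cur : List Char) (acc : List (List Char)), l.length < fuel →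
    PySem.Chars.splitOn.go ['"'] fuel l cur acc =
      acc.reverse ++ (pvSegs l).modifyHead (cur.reverse ++ ·) := by
  intro fuel
  induction fuel with
  | zero => intro l cur acc h; omega
  | succ f ih =>
    intro l cur acc h
    cases l with
    | nil => simp [PySem.Chars.splitOn.go, pvSegs]
    | cons c rest =>
      simp only [PySem.Chars.splitOn.go]
      by_cases hc : c = '"'
      · subst hc
        rw [if_pos (by simp [List.isPrefixOf])]
        rw [ih _ _ _ (by simpa using Nat.lt_of_succ_lt_succ h)]
        cases hseg : pvSegs rest with
        | nil => exact absurd hseg (pvSegs_ne_nil rest)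
        | cons a t => simp [pvSegs, hseg]
      · rw [if_neg (by simp [List.isPrefixOf]; exact fun h' => hc h'.symm)]
        rw [ih _ _ _ (by simpa using Nat.lt_of_succ_lt_succ h)]
        cases hseg : pvSegs rest with
        | nil => exact absurd hseg (pvSegs_ne_nil rest)
        | cons a t => simp [pvSegs, hc, hseg]

theorem pvSplitOn_eq_segs (s : List Char) : PySem.Chars.splitOn s ['"'] = pvSegs s := by
  rw [PySem.Chars.splitOn, pvGoSpec _ _ _ _ (by omega)]
  cases h : pvSegs s with
  | nil => exact absurd h (pvSegs_ne_nil s)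
  | cons a t => simp

-- shifting the running index of find.go for the needle ['[']
theorem pvFindGo_shift : ∀ (l : List Char) (k : Nat),
    PySem.Chars.find.go ['['] l k =
      if PySem.Chars.find.go ['['] l 0 = -1 then -1 else (k : Int) + PySem.Chars.find.go ['['] l 0 := by
  intro l
  induction l with
  | nil => intro k; simp [PySem.Chars.find.go]
  | cons c t ih =>
    intro k
    simp only [PySem.Chars.find.go]
    by_cases hc : ('[' :: []).isPrefixOf (c :: t) = true
    · simp [hc]
    · simp only [hc, Bool.false_eq_true, if_false]
      rw [ih (k+1), ih 1]
      by_cases h0 : PySem.Chars.find.go ['['] t 0 = -1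
      · simp [h0]
      · have hnn : 0 ≤ PySem.Chars.find.go ['['] t 0 := by
          have := PySem.Chars.neg_one_le_find t ['[']
          rw [PySem.Chars.find] at this
          omega
        simp only [h0, if_false]
        rw [if_neg (by omega)]
        push_cast
        ring

theorem pvFind_nil : PySem.Chars.find [] ['['] = -1 := by decide

theorem pvFind_cons (c : Char) (h : List Char) :
    PySem.Chars.find (c :: h) ['['] =
      if c = '[' then 0
      else if PySem.Chars.find h ['['] = -1 then -1 else 1 + PySem.Chars.find h ['['] := by
  simp only [PySem.Chars.find, PySem.Chars.find.go]
  by_cases hc : c = '['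
  · subst hc; rw [if_pos (by simp [List.isPrefixOf]), if_pos rfl]; simp
  · rw [if_neg (by simp [List.isPrefixOf]; exact fun h' => hc h'.symm), if_neg hc]
    exact pvFindGo_shift h 1

-- the even/odd segment loop with an explicit parity flag (proof-side view of B's loop)
def pvBcore : List (List Char) → Bool → Int → Int
  | [], _, _ => -1
  | seg :: rest, ev, off =>
    if ev then
      if PySem.Chars.find seg ['['] = -1 then pvBcore rest false (off + seg.length + 1)
      else off + PySem.Chars.find seg ['[']
    else pvBcore rest true (off + seg.length + 1)

theorem pvAltLoopB_eq_bcore : ∀ (l : List (List Char)) (idx : Nat) (off : Int),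
    pvAltLoopB l idx off = pvBcore l (idx % 2 == 0) off := by
  intro l
  induction l with
  | nil => intro idx off; cases h : (idx % 2 == 0) <;> simp [pvAltLoopB, pvBcore]
  | cons seg rest ih =>
    intro idx off
    have hpar : ((idx + 1) % 2 == 0) = !(idx % 2 == 0) := by
      rcases Nat.mod_two_eq_zero_or_one idx with h | h <;> simp [Nat.add_mod, h]
    rcases Nat.mod_two_eq_zero_or_one idx with h | h
    · by_cases hf : PySem.Chars.find seg ['['] = -1
      · simp [pvAltLoopB, pvBcore, h, hf, ih, hpar]
      · simp [pvAltLoopB, pvBcore, h, hf, bne_iff_ne]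
    · simp [pvAltLoopB, pvBcore, h, ih, hpar]

-- A's character loop equals B's segment loop on the split of the same string
theorem pvMain : ∀ (s : List Char) (inq : Bool) (i : Int),
    pvFindLoopA s inq i = pvBcore (pvSegs s) (!inq) i := by
  intro s
  induction s with
  | nil =>
    intro inq i
    cases inq <;> simp [pvFindLoopA, pvSegs, pvBcore, pvFind_nil]
  | cons c rest ih =>
    intro inq i
    by_cases hc : c = '"'
    · subst hc
      have h1 : pvFindLoopA ('"' :: rest) inq i = pvFindLoopA rest (!inq) (i + 1) := by
        simp [pvFindLoopA]
      rw [h1, ih]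
      cases inq <;> simp [pvSegs, pvBcore, pvFind_nil]
    · cases hseg : pvSegs rest with
      | nil => exact absurd hseg (pvSegs_ne_nil rest)
      | cons a t =>
        have hsegc : pvSegs (c :: rest) = (c :: a) :: t := by
          simp [pvSegs, hc, hseg]
        rw [hsegc]
        cases inq with
        | false =>
          by_cases hb : c = '['
          · subst hb
            simp [pvFindLoopA, pvBcore, pvFind_cons, hc]
          · have h1 : pvFindLoopA (c :: rest) false i = pvFindLoopA rest false (i + 1) := by
              simp [pvFindLoopA, hc, hb]
            rw [h1, ih, hseg]
            by_cases hf : PySem.Chars.find a ['['] = -1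
            · simp only [pvBcore, pvFind_cons, if_neg hb, hf, Bool.not_false, if_true,
                List.length_cons]
              congr 1
              push_cast
              ring
            · have hnn : 0 ≤ PySem.Chars.find a ['['] := by
                have := PySem.Chars.neg_one_le_find a ['[']
                omega
              have hne : ¬(1 + PySem.Chars.find a ['['] = -1) := by omega
              simp only [pvBcore, pvFind_cons, if_neg hb, hf, if_false, if_neg hne,
                Bool.not_false, if_true]
              ring
        | true =>
          have h1 : pvFindLoopA (c :: rest) true i = pvFindLoopA rest true (i + 1) := by
            simp [pvFindLoopA, hc]
          rw [h1, ih, hseg]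
          simp only [pvBcore, Bool.not_true, Bool.false_eq_true, if_false, List.length_cons]
          congr 1
          push_cast
          ring

-- ===== VERDICT (by name: the statement is the Claim_ definition above) =====
theorem find_top_level_bracket_py_spec : Claim_equal_find_top_level_bracket_py := by
  intro text _
  unfold Spec_find_top_level_bracket_py find_top_level_bracket_py find_top_level_bracket_py_alt
  rw [pvSplitOn_eq_segs, pvAltLoopB_eq_bcore, pvMain]
  rfl
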